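-- pv_equiv track=rewrite | github.com/future-item/ILP-CoT | ILP-COT/tools.py | dedup_sublists
-- ===== SOURCE A (Python) =====
-- def dedup_sublists(list_of_lists):
--     deduped = []
--     for sub in list_of_lists:
--         seen = set()
--         new_sub = []
--         for item in sub:
--             if item not in seen:
--                 seen.add(item)
--                 new_sub.append(item)
--         deduped.append(new_sub)
--     return deduped
-- ===== SOURCE B (Python) =====
-- def dedup_sublists(list_of_lists):
--     deduped = []
--     for sub in list_of_lists:
--         new_sub = []
--         rest = sub
--         while rest:
--             head = rest[0]
--             new_sub.append(head)
--             rest = [x for x in rest[1:] if x != head]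
--         deduped.append(new_sub)
--     return deduped
-- ===== Notes on version B (the rewrite author's own statement) =====
-- stated objective: alternative
-- what changed: Instead of scanning each sublist once with a seen-set membership test, B repeatedly takes the current head and filters every later occurrence of it out of the remainder, so no set (or any auxiliary lookup structure) is maintained at all; it trades the hash set for staged filtering passes (quadratic in the worst case).
import Mathlib
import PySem

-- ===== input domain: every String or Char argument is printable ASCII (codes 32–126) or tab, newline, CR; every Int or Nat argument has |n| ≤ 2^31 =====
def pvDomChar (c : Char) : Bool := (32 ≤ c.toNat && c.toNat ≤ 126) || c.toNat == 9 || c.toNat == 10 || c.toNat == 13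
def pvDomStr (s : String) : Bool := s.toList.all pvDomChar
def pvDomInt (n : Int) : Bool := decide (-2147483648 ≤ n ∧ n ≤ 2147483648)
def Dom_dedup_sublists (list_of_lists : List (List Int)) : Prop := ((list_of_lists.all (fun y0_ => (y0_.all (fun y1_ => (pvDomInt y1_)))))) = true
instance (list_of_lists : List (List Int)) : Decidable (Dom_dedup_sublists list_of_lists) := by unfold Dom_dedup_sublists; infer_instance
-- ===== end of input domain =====

-- B drops the seen-set entirely: it repeatedly takes the current head and filters its later
-- occurrences out of the remainder (staged filtering passes instead of one pass with a hash set).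

-- ===== PORT A =====
-- inner loop: for item in sub: if item not in seen: seen.add(item); new_sub.append(item)
def dedupInnerA (sub : List Int) : PySem.Set Int × List Int :=
  sub.foldl
    (fun st item =>
      if PySem.Set.contains st.1 item then st
      else (PySem.Set.add st.1 item, st.2 ++ [item]))
    (PySem.Set.empty, [])

def dedup_sublists (list_of_lists : List (List Int)) : List (List Int) :=
  list_of_lists.foldl (fun deduped sub => deduped ++ [(dedupInnerA sub).2]) []

-- ===== PORT B =====
-- while rest: head = rest[0]; new_sub.append(head); rest = [x for x in rest[1:] if x != head]
def dedupInnerB (sub : List Int) : List Int :=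
  match sub with
  | [] => []
  | head :: rest => head :: dedupInnerB (rest.filter (fun x => x ≠ head))
termination_by sub.length
decreasing_by
  simpa [Nat.lt_succ_iff] using (List.length_filter_le _ _).trans (le_of_eq List.length_attach)

def dedup_sublists_alt (list_of_lists : List (List Int)) : List (List Int) :=
  list_of_lists.foldl (fun deduped sub => deduped ++ [dedupInnerB sub]) []

-- ===== PRECONDITION & SPEC =====
def Spec_dedup_sublists (list_of_lists : List (List Int)) (out : List (List Int)) : Prop := out = dedup_sublists_alt list_of_lists
instance (list_of_lists : List (List Int)) (out : List (List Int)) : Decidable (Spec_dedup_sublists list_of_lists out) := by unfold Spec_dedup_sublists; infer_instance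

-- ===== CLAIM (what is proved, stated in full; the proofs are below) =====
def Claim_equal_dedup_sublists : Prop := ∀ (list_of_lists : List (List Int)), Dom_dedup_sublists list_of_lists → Spec_dedup_sublists list_of_lists (dedup_sublists list_of_lists)

-- ===== LEMMAS AND PROOFS =====

-- A's inner loop maintains seen = new_sub (as lists): both evolve as PySem.Set.update.
theorem dedupInnerA_invariant (sub : List Int) (s : PySem.Set Int) :
    sub.foldl
      (fun st item =>
        if PySem.Set.contains st.1 item then st
        else (PySem.Set.add st.1 item, st.2 ++ [item]))
      (s, (s : List Int))
    = (PySem.Set.update s sub, PySem.Set.update s sub) := by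
  induction sub generalizing s with
  | nil => rfl
  | cons a t ih =>
    simp only [List.foldl_cons]
    have hstep : (if PySem.Set.contains s a then ((s : PySem.Set Int), (s : List Int))
        else (PySem.Set.add s a, (s : List Int) ++ [a]))
        = (PySem.Set.add s a, (PySem.Set.add s a : List Int)) := by
      by_cases h : a ∈ s <;> simp [PySem.Set.add, h]
    rw [hstep, ih (PySem.Set.add s a)]
    simp [PySem.Set.update]

theorem dedupInnerA_snd (sub : List Int) : (dedupInnerA sub).2 = PySem.List.dedup sub := by
  have h := dedupInnerA_invariant sub PySem.Set.empty
  simp only [dedupInnerA]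
  rw [show ((PySem.Set.empty : PySem.Set Int), ([] : List Int)) = (PySem.Set.empty, (PySem.Set.empty : List Int)) from rfl, h]
  simp [PySem.Set.update, PySem.Set.empty, PySem.List.dedup_eq_ofList, PySem.Set.ofList_eq_foldl]

-- folding Set.add from the singleton state [h] equals h consed onto the fold (h's copies removed)
theorem foldl_add_cons (t : List Int) (s : PySem.Set Int) (h : Int) (hs : h ∉ s) :
    t.foldl PySem.Set.add (h :: s) = h :: (t.filter (fun x => x ≠ h)).foldl PySem.Set.add s := by
  induction t generalizing s with
  | nil => rfl
  | cons a t ih =>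
    by_cases hah : a = h
    · subst hah
      have : PySem.Set.add (a :: s) a = a :: s := by simp [PySem.Set.add]
      simp [List.foldl_cons, ih s hs]
    · have hmem : a ∈ (h :: s) ↔ a ∈ s := by simp [hah]
      have hadd : PySem.Set.add (h :: s) a = h :: PySem.Set.add s a := by
        by_cases h' : a ∈ s
        · simp [PySem.Set.add, h', hah]
        · simp [PySem.Set.add, h', hah]
      have hha : h ≠ a := fun e => hah e.symm
      have hns : h ∉ PySem.Set.add s a := by
        by_cases h' : a ∈ s <;> simp [PySem.Set.add, h', hs, hha]
      simp only [List.foldl_cons, List.filter_cons]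
      simp [hah, hadd, ih (PySem.Set.add s a) hns]

theorem dedup_cons (h : Int) (t : List Int) :
    PySem.List.dedup (h :: t) = h :: PySem.List.dedup (t.filter (fun x => x ≠ h)) := by
  simp only [PySem.List.dedup_eq_ofList, PySem.Set.ofList_eq_foldl, List.foldl_cons]
  have : PySem.Set.add ([] : PySem.Set Int) h = [h] := by simp [PySem.Set.add]
  rw [show PySem.Set.add ([] : PySem.Set Int) h = (h :: ([] : PySem.Set Int)) from this]
  exact foldl_add_cons t [] h (by simp)

theorem dedupInnerB_eq (sub : List Int) : dedupInnerB sub = PySem.List.dedup sub := by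
  suffices H : ∀ (n : Nat) (sub : List Int), sub.length ≤ n → dedupInnerB sub = PySem.List.dedup sub from
    H sub.length sub le_rfl
  intro n
  induction n with
  | zero =>
    intro sub h
    have : sub = [] := List.eq_nil_of_length_eq_zero (Nat.le_zero.mp h)
    subst this; rw [dedupInnerB.eq_def]; rfl
  | succ n ih =>
    intro sub h
    match sub with
    | [] => rw [dedupInnerB.eq_def]; rfl
    | head :: rest =>
      rw [show dedupInnerB (head :: rest)
            = head :: dedupInnerB (rest.filter (fun x => x ≠ head)) from by rw [dedupInnerB.eq_def]]
      rw [dedup_cons,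
        ih _ ((List.length_filter_le _ _).trans (by simpa using Nat.lt_succ_iff.mp (by simpa using h)))]

-- ===== VERDICT (by name: the statement is the Claim_ definition above) =====
theorem dedup_sublists_spec : Claim_equal_dedup_sublists := by
  intro l _
  unfold Spec_dedup_sublists dedup_sublists dedup_sublists_alt
  rw [PySem.List.foldl_append_singleton_eq_map, PySem.List.foldl_append_singleton_eq_map]
  exact List.map_congr_left (fun sub _ => by rw [dedupInnerA_snd, dedupInnerB_eq])
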